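-- pv_equiv track=rewrite | github.com/io-fault/terminal | libfields.py | address
-- ===== SOURCE A (Python) =====
-- def address(seq, start, stop, len = len, range = range):
-- 	"""
-- 	Find the address of the absolute slice.
-- 	"""
-- 	start = start or 0
-- 	assert start <= stop
-- 	assert start >= 0
-- 	assert stop >= 0
--
-- 	sl = len(seq)
--
-- 	start_index = 0
-- 	position = 0
--
-- 	# find start
-- 	for i in range(0, sl):
-- 		ilen = len(seq[i])
-- 		position += ilen
-- 		if position >= start:
-- 			# found the position
-- 			start_index = i
-- 			start_index_offset = position - ilen
-- 			break
-- 	else: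
-- 		# request beyond the text length
-- 		return ((sl, 0), (sl, 0))
-- 	start_roffset = start - start_index_offset
--
-- 	# find stop
-- 	position = start_index_offset
-- 	for i in range(start_index, sl):
-- 		ilen = len(seq[i])
-- 		position += ilen
-- 		if position >= stop:
-- 			# found the position
-- 			stop_index = i
-- 			stop_index_offset = position - ilen
-- 			break
-- 	else:
-- 		# stop offset exceeds total length
-- 		stop_index_offset = position - ilen # total string length
-- 		stop_index = sl - 1 # end of sequence
--
-- 	stop_roffset = stop - stop_index_offset
--
-- 	# compound slice
-- 	return (
-- 		(start_index, start_roffset),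
-- 		(stop_index, stop_roffset),
-- 	)
-- ===== SOURCE B (Python) =====
-- def address(seq, start, stop, len = len, range = range):
-- 	"""
-- 	Find the address of the absolute slice.
-- 	"""
-- 	start = start or 0
-- 	assert start <= stop
-- 	assert start >= 0
-- 	assert stop >= 0
--
-- 	# one pass: cumulative lengths
-- 	prefix = []
-- 	total = 0
-- 	for s in seq:
-- 		total += len(s)
-- 		prefix.append(total)
-- 	sl = len(seq)
--
-- 	# binary search: first index with prefix[i] >= x (bisect_left)
-- 	def first_ge(x):
-- 		lo, hi = 0, sl
-- 		while lo < hi: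
-- 			mid = (lo + hi) // 2
-- 			if prefix[mid] < x:
-- 				lo = mid + 1
-- 			else:
-- 				hi = mid
-- 		return lo
--
-- 	si = first_ge(start)
-- 	if si == sl:
-- 		# request beyond the text length
-- 		return ((sl, 0), (sl, 0))
-- 	so = prefix[si - 1] if si > 0 else 0
--
-- 	ti = first_ge(stop)
-- 	if ti == sl:
-- 		ti = sl - 1  # stop offset exceeds total length: clamp to last segment
-- 	to = prefix[ti - 1] if ti > 0 else 0
--
-- 	return ((si, start - so), (ti, stop - to))
-- ===== Notes on version B (the rewrite author's own statement) =====
-- stated objective: alternative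
-- what changed: Replaces A's two sequential linear break/else scans with a single cumulative-length (prefix-sum) pass followed by two binary searches (bisect_left) with uniform offset lookup prefix[i-1].
import Mathlib
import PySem

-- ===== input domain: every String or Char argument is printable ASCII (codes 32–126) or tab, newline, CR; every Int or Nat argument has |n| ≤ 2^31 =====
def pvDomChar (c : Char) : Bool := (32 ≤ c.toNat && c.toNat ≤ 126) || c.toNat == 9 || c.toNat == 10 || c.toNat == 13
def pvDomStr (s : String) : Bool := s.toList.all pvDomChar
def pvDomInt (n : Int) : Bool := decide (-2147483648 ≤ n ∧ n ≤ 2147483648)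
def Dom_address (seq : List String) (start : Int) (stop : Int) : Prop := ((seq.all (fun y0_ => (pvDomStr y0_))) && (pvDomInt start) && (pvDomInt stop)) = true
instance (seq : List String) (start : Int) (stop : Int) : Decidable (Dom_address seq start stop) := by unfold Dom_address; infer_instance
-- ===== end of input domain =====

-- B replaces A's two break/else linear scans by one cumulative-length pass plus two
-- binary searches (bisect_left); return value only, no observable mutation.

-- ===== PORT A =====
-- first loop: scan for the first i with cumulative position ≥ start;
-- returns (i, position - ilen, suffix of seq starting at i), none = loop's else branch
def addrFindStart : List String → Int → Int → Int → Option (Int × Int × List String)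
  | [], _, _, _ => none
  | s :: rest, start, i, position =>
    let ilen := PySem.Str.len s
    let position := position + ilen
    if position ≥ start then some (i, position - ilen, s :: rest)
    else addrFindStart rest start (i + 1) position

-- second loop: scan from start_index; else branch returns (sl - 1, position - ilen)
-- with i = sl and ilen the leftover from the previous iteration (Python's leftover variable)
def addrFindStop : List String → Int → Int → Int → Int → Int × Int
  | [], _, i, position, ilen => (i - 1, position - ilen)
  | s :: rest, stop, i, position, _ =>
    let ilen := PySem.Str.len s
    let position := position + ilen
    if position ≥ stop then (i, position - ilen)
    else addrFindStop rest stop (i + 1) position ilen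

def address (seq : List String) (start : Int) (stop : Int) : (Int × Int) × (Int × Int) :=
  -- 'start = start or 0' is the identity on ints (0 or 0 == 0); asserts are Pre_address
  let sl : Int := seq.length
  match addrFindStart seq start 0 0 with
  | none => ((sl, 0), (sl, 0))
  | some (si, sio, suffix) =>
    let start_roffset := start - sio
    let (ti, tio) := addrFindStop suffix stop si sio (PySem.Str.len (suffix.headD ""))
    ((si, start_roffset), (ti, stop - tio))

-- ===== PORT B =====
-- one pass: cumulative lengths, prefix[i] = total length of seq[0..i]
def addrPrefix : List String → Int → List Int
  | [], _ => []
  | s :: rest, total =>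
    let total := total + PySem.Str.len s
    total :: addrPrefix rest total

-- 'while lo < hi' binary search: first index in [lo,hi) with pre[mid] ≥ x (bisect_left);
-- fuel counts loop iterations (each shrinks hi - lo, so fuel = hi - lo at the call is enough)
def addrBisectGo (pre : List Int) (x : Int) : Nat → Nat → Nat → Nat
  | 0, lo, _ => lo
  | fuel + 1, lo, hi =>
    if lo < hi then
      let mid := (lo + hi) / 2
      if pre.getD mid 0 < x then addrBisectGo pre x fuel (mid + 1) hi
      else addrBisectGo pre x fuel lo mid
    else lo

def addrBisect (pre : List Int) (x : Int) (lo hi : Nat) : Nat :=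
  addrBisectGo pre x (hi - lo) lo hi

def address_alt (seq : List String) (start : Int) (stop : Int) : (Int × Int) × (Int × Int) :=
  let pre := addrPrefix seq 0
  let sl := seq.length
  let si := addrBisect pre start 0 sl
  if si = sl then (((sl : Int), 0), ((sl : Int), 0))
  else
    let so := if si > 0 then pre.getD (si - 1) 0 else 0
    let ti0 := addrBisect pre stop 0 sl
    let ti := if ti0 = sl then sl - 1 else ti0
    let tio := if ti > 0 then pre.getD (ti - 1) 0 else 0
    (((si : Int), start - so), ((ti : Int), stop - tio))

-- ===== PRECONDITION & SPEC =====
-- Pre_ excludes exactly the inputs where A's asserts fail (AssertionError): start < 0 or start > stop.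
def Pre_address (seq : List String) (start : Int) (stop : Int) : Prop := 0 ≤ start ∧ start ≤ stop
instance (seq : List String) (start : Int) (stop : Int) : Decidable (Pre_address seq start stop) := by unfold Pre_address; infer_instance
def pvWitness_address : List String × Int × Int := (["ab", "", "cde"], 1, 4)

def Spec_address (seq : List String) (start : Int) (stop : Int) (out : (Int × Int) × (Int × Int)) : Prop := out = address_alt seq start stop
instance (seq : List String) (start : Int) (stop : Int) (out : (Int × Int) × (Int × Int)) : Decidable (Spec_address seq start stop out) := by unfold Spec_address; infer_instance

-- ===== CLAIM (what is proved, stated in full; the proofs are below) =====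
def Claim_equal_address : Prop := ∀ (seq : List String) (start : Int) (stop : Int), Dom_address seq start stop → Pre_address seq start stop → Spec_address seq start stop (address seq start stop)


-- ===== LEMMAS AND PROOFS =====

-- "k is the bisect_left position of x in pre": all entries before k are < x, entry at k (if any) is ≥ x
def FirstGE (pre : List Int) (x : Int) (k : Nat) : Prop :=
  k ≤ pre.length ∧ (∀ i, i < k → pre.getD i 0 < x) ∧ (k < pre.length → x ≤ pre.getD k 0)

theorem firstGE_unique (pre : List Int) (x : Int) (k1 k2 : Nat)
    (h1 : FirstGE pre x k1) (h2 : FirstGE pre x k2) : k1 = k2 := by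
  obtain ⟨b1, lt1, ge1⟩ := h1
  obtain ⟨b2, lt2, ge2⟩ := h2
  rcases Nat.lt_trichotomy k1 k2 with h | h | h
  · have := lt2 k1 h
    have := ge1 (by omega)
    omega
  · exact h
  · have := lt1 k2 h
    have := ge2 (by omega)
    omega

theorem strLen_nonneg (s : String) : 0 ≤ PySem.Str.len s := by
  simp [PySem.Str.len_eq]

theorem addrPrefix_length (seq : List String) (t : Int) :
    (addrPrefix seq t).length = seq.length := by
  induction seq generalizing t with
  | nil => rfl
  | cons s rest ih => simp [addrPrefix, ih]

theorem addrPrefix_lb (seq : List String) (t : Int) (j : Nat) (hj : j < seq.length) :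
    t ≤ (addrPrefix seq t).getD j 0 := by
  induction seq generalizing t j with
  | nil => simp at hj
  | cons s rest ih =>
    cases j with
    | zero => simp only [addrPrefix, List.getD_cons_zero]; have := strLen_nonneg s; omega
    | succ j =>
      simp only [addrPrefix, List.getD_cons_succ]
      have := ih (t + PySem.Str.len s) j (by simpa using hj)
      have := strLen_nonneg s
      omega

theorem addrPrefix_mono (seq : List String) (t : Int) (i j : Nat)
    (hij : i ≤ j) (hj : j < seq.length) :
    (addrPrefix seq t).getD i 0 ≤ (addrPrefix seq t).getD j 0 := by
  induction seq generalizing t i j with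
  | nil => simp at hj
  | cons s rest ih =>
    cases i with
    | zero =>
      cases j with
      | zero => exact le_refl _
      | succ j =>
        simp only [addrPrefix, List.getD_cons_zero, List.getD_cons_succ]
        exact addrPrefix_lb rest (t + PySem.Str.len s) j (by simpa using hj)
    | succ i =>
      cases j with
      | zero => omega
      | succ j =>
        simp only [addrPrefix, List.getD_cons_succ]
        exact ih (t + PySem.Str.len s) i j (by omega) (by simpa using hj)

-- pre[k] - len(seq[k]) is the cumulative length BEFORE segment k
theorem addrPrefix_sub_len (seq : List String) (t : Int) (k : Nat) (hk : k < seq.length) :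
    (addrPrefix seq t).getD k 0 - PySem.Str.len (seq.getD k "") =
      (if k > 0 then (addrPrefix seq t).getD (k - 1) 0 else t) := by
  induction seq generalizing t k with
  | nil => simp at hk
  | cons s rest ih =>
    cases k with
    | zero => simp [addrPrefix]
    | succ k =>
      simp only [addrPrefix, List.getD_cons_succ]
      rw [ih (t + PySem.Str.len s) k (by simpa using hk)]
      cases k with
      | zero => simp [addrPrefix]
      | succ k => simp

-- dropping k segments shifts the prefix list, with the new base offset = cumul before k
theorem addrPrefix_drop (seq : List String) (t : Int) (k : Nat) (hk : k ≤ seq.length) :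
    addrPrefix (seq.drop k) (if k > 0 then (addrPrefix seq t).getD (k - 1) 0 else t) =
      (addrPrefix seq t).drop k := by
  induction seq generalizing t k with
  | nil =>
    have : k = 0 := by simpa using hk
    subst this
    simp
  | cons s rest ih =>
    cases k with
    | zero => simp
    | succ k =>
      simp only [List.drop_succ_cons, addrPrefix]
      rw [← ih (t + PySem.Str.len s) k (by simpa using hk)]
      cases k with
      | zero => simp
      | succ k => simp

-- binary search correctness, by fuel induction with the loop invariants
theorem addrBisectGo_spec (pre : List Int) (x : Int)
    (mono : ∀ i j, i ≤ j → j < pre.length → pre.getD i 0 ≤ pre.getD j 0)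
    (fuel lo hi : Nat) (hhi : hi ≤ pre.length) (hlo : lo ≤ hi) (hfuel : hi - lo ≤ fuel)
    (inv1 : ∀ i, i < lo → pre.getD i 0 < x)
    (inv2 : ∀ i, hi ≤ i → i < pre.length → x ≤ pre.getD i 0) :
    FirstGE pre x (addrBisectGo pre x fuel lo hi) := by
  induction fuel generalizing lo hi with
  | zero =>
    have : lo = hi := by omega
    subst this
    exact ⟨by simpa [addrBisectGo] using hhi, by simpa [addrBisectGo] using inv1,
      by simpa [addrBisectGo] using fun h => inv2 lo (le_refl _) h⟩
  | succ fuel ih =>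
    simp only [addrBisectGo]
    by_cases h : lo < hi
    · simp only [if_pos h]
      by_cases hm : pre.getD ((lo + hi) / 2) 0 < x
      · simp only [if_pos hm]
        refine ih ((lo + hi) / 2 + 1) hi hhi (by omega) (by omega) ?_ inv2
        intro i hi2
        by_cases hlt : i < lo
        · exact inv1 i hlt
        · exact lt_of_le_of_lt (mono i ((lo + hi) / 2) (by omega) (by omega)) hm
      · simp only [if_neg hm]
        refine ih lo ((lo + hi) / 2) (by omega) (by omega) (by omega) inv1 ?_
        intro i hi1 hi2
        exact le_trans (le_of_not_gt hm) (mono ((lo + hi) / 2) i hi1 hi2)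
    · simp only [if_neg h]
      have : lo = hi := by omega
      subst this
      exact ⟨hhi, inv1, fun h2 => inv2 lo (le_refl _) h2⟩

theorem addrBisect_spec (pre : List Int) (x : Int)
    (mono : ∀ i j, i ≤ j → j < pre.length → pre.getD i 0 ≤ pre.getD j 0) :
    FirstGE pre x (addrBisect pre x 0 pre.length) := by
  exact addrBisectGo_spec pre x mono pre.length 0 pre.length (le_refl _) (by omega) (by omega)
    (by omega) (by omega)

-- A's first loop: it either runs off the end (all cumulatives < x) or breaks at the
-- bisect_left position k, returning index i+k, the cumulative before k, and the suffix at k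
theorem findStart_spec (seq : List String) (x : Int) (i t : Int) :
    (addrFindStart seq x i t = none ∧
      ∀ j, j < seq.length → (addrPrefix seq t).getD j 0 < x) ∨
    (∃ k : Nat, k < seq.length ∧
      addrFindStart seq x i t = some (i + k,
        (addrPrefix seq t).getD k 0 - PySem.Str.len (seq.getD k ""), seq.drop k) ∧
      FirstGE (addrPrefix seq t) x k) := by
  induction seq generalizing i t with
  | nil => left; exact ⟨rfl, by simp⟩
  | cons s rest ih =>
    rw [addrFindStart]
    simp only [ge_iff_le]
    by_cases h : x ≤ t + PySem.Str.len s
    · rw [if_pos h]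
      right
      refine ⟨0, by simp, ?_, ?_⟩
      · simp only [addrPrefix, List.getD_cons_zero, List.drop_zero, Nat.cast_zero, add_zero,
          add_sub_cancel_right]
      · refine ⟨by simp [addrPrefix_length], by omega, ?_⟩
        intro _
        simpa only [addrPrefix, List.getD_cons_zero] using h
    · rw [if_neg h]
      rcases ih (i + 1) (t + PySem.Str.len s) with ⟨hres, hall⟩ | ⟨k, hk, hres, hb, hlt, hge⟩
      · left
        refine ⟨hres, ?_⟩
        intro j hj
        cases j with
        | zero => simp only [addrPrefix, List.getD_cons_zero]; omega
        | succ j =>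
          simp only [addrPrefix, List.getD_cons_succ]
          exact hall j (by simpa using hj)
      · right
        refine ⟨k + 1, by simp only [List.length_cons]; omega, ?_, ?_, ?_, ?_⟩
        · rw [hres]
          simp only [addrPrefix, List.getD_cons_succ, List.getD_cons_succ, List.drop_succ_cons]
          congr 2
          push_cast
          ring
        · simp only [addrPrefix_length, List.length_cons]; omega
        · intro j hj
          cases j with
          | zero => simp only [addrPrefix, List.getD_cons_zero]; omega
          | succ j =>
            simp only [addrPrefix, List.getD_cons_succ]
            exact hlt j (by omega)
        · intro hlen
          simp only [addrPrefix, List.getD_cons_succ, List.length_cons] at hlen ⊢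
          exact hge (by simp only [addrPrefix_length] at hlen ⊢; omega)

theorem findStop_spec (s0 : String) (rest : List String) (x : Int) (i t ilen0 : Int) :
    (∃ k : Nat, k < (s0 :: rest).length ∧
      addrFindStop (s0 :: rest) x i t ilen0 = (i + k,
        (addrPrefix (s0 :: rest) t).getD k 0 - PySem.Str.len ((s0 :: rest).getD k "")) ∧
      FirstGE (addrPrefix (s0 :: rest) t) x k) ∨
    ((∀ j, j < (s0 :: rest).length → (addrPrefix (s0 :: rest) t).getD j 0 < x) ∧
      addrFindStop (s0 :: rest) x i t ilen0 = (i + (s0 :: rest).length - 1,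
        (addrPrefix (s0 :: rest) t).getD ((s0 :: rest).length - 1) 0 -
          PySem.Str.len ((s0 :: rest).getD ((s0 :: rest).length - 1) ""))) := by
  induction rest generalizing s0 i t ilen0 with
  | nil =>
    rw [addrFindStop]
    simp only [ge_iff_le]
    by_cases h : x ≤ t + PySem.Str.len s0
    · rw [if_pos h]
      left
      refine ⟨0, by simp, ?_, ?_⟩
      · simp only [addrPrefix, List.getD_cons_zero, Nat.cast_zero, add_zero,
          add_sub_cancel_right]
      · refine ⟨by simp [addrPrefix_length], by omega, ?_⟩
        intro _
        simpa only [addrPrefix, List.getD_cons_zero] using h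
    · rw [if_neg h]
      right
      constructor
      · intro j hj
        have : j = 0 := by simpa using hj
        subst this
        simp only [addrPrefix, List.getD_cons_zero]
        omega
      · rw [addrFindStop]
        norm_num [addrPrefix]
  | cons r rs ih =>
    rw [addrFindStop]
    simp only [ge_iff_le]
    by_cases h : x ≤ t + PySem.Str.len s0
    · rw [if_pos h]
      left
      refine ⟨0, by simp, ?_, ?_⟩
      · simp only [addrPrefix, List.getD_cons_zero, Nat.cast_zero, add_zero,
          add_sub_cancel_right]
      · refine ⟨by simp [addrPrefix_length], by omega, ?_⟩
        intro _
        simpa only [addrPrefix, List.getD_cons_zero] using h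
    · rw [if_neg h]
      rcases ih r (i + 1) (t + PySem.Str.len s0) (PySem.Str.len s0) with
        ⟨k, hk, hres, hb, hlt, hge⟩ | ⟨hall, hres⟩
      · left
        refine ⟨k + 1, by simp only [List.length_cons] at hk ⊢; omega, ?_, ?_, ?_, ?_⟩
        · rw [hres]
          simp only [addrPrefix, List.getD_cons_succ, Prod.mk.injEq]
          refine ⟨by push_cast; ring, trivial⟩
        · simp only [List.length_cons] at hk
          simp only [addrPrefix_length, List.length_cons]
          omega
        · intro j hj
          cases j with
          | zero => simp only [addrPrefix, List.getD_cons_zero]; omega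
          | succ j =>
            simp only [addrPrefix, List.getD_cons_succ]
            exact hlt j (by omega)
        · intro hlen
          simp only [addrPrefix, List.getD_cons_succ]
          exact hge (by simp only [addrPrefix_length, List.length_cons] at hlen ⊢; omega)
      · right
        constructor
        · intro j hj
          cases j with
          | zero => simp only [addrPrefix, List.getD_cons_zero]; omega
          | succ j =>
            simp only [addrPrefix, List.getD_cons_succ]
            exact hall j (by simpa using hj)
        · rw [hres]
          simp only [addrPrefix, List.length_cons, List.getD_cons_succ,
            Nat.add_sub_cancel, Prod.mk.injEq]
          refine ⟨by push_cast; ring, trivial⟩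

theorem getD_drop {α : Type} (l : List α) (k m : Nat) (d : α) :
    (l.drop k).getD m d = l.getD (k + m) d := by
  simp [List.getD_eq_getElem?_getD, List.getElem?_drop]

-- ===== VERDICT (by name: the statement is the Claim_ definition above) =====
theorem address_spec : Claim_equal_address := by
  unfold Claim_equal_address
  intro seq start stop _ hpre
  obtain ⟨h0, hss⟩ := hpre
  unfold Spec_address address address_alt
  have hlen : (addrPrefix seq 0).length = seq.length := addrPrefix_length seq 0
  have mono : ∀ i j, i ≤ j → j < (addrPrefix seq 0).length →
      (addrPrefix seq 0).getD i 0 ≤ (addrPrefix seq 0).getD j 0 := by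
    intro i j hij hj
    exact addrPrefix_mono seq 0 i j hij (by omega)
  have hbs1 : FirstGE (addrPrefix seq 0) start
      (addrBisect (addrPrefix seq 0) start 0 seq.length) := by
    rw [← hlen]; exact addrBisect_spec _ start mono
  have hbs2 : FirstGE (addrPrefix seq 0) stop
      (addrBisect (addrPrefix seq 0) stop 0 seq.length) := by
    rw [← hlen]; exact addrBisect_spec _ stop mono
  rcases findStart_spec seq start 0 0 with ⟨hres, hall⟩ | ⟨k, hk, hres, hFG⟩
  · -- A's first loop falls through: request beyond text length; B's bisect returns sl
    rw [hres]
    have hsi : addrBisect (addrPrefix seq 0) start 0 seq.length = seq.length := by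
      set si := addrBisect (addrPrefix seq 0) start 0 seq.length with hsidef
      by_contra hne
      have h1 : si < (addrPrefix seq 0).length := by have := hbs1.1; omega
      have h2 := hbs1.2.2 h1
      have h3 := hall si (by omega)
      omega
    simp [hsi]
  · -- A's first loop breaks at k = bisect_left(prefix, start)
    have hsik : addrBisect (addrPrefix seq 0) start 0 seq.length = k :=
      firstGE_unique _ _ _ _ hbs1 hFG
    have hkne : ¬ (k = seq.length) := by omega
    have hsio : (addrPrefix seq 0).getD k 0 - PySem.Str.len (seq.getD k "") =
        (if k > 0 then (addrPrefix seq 0).getD (k - 1) 0 else 0) :=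
      addrPrefix_sub_len seq 0 k hk
    have hdrop : seq.drop k = seq.getD k "" :: seq.drop (k + 1) := by
      rw [List.getD_eq_getElem?_getD, List.getElem?_eq_getElem hk]
      exact List.drop_eq_getElem_cons hk
    have hlocal : addrPrefix (seq.drop k) ((addrPrefix seq 0).getD k 0 -
        PySem.Str.len (seq.getD k "")) = (addrPrefix seq 0).drop k := by
      rw [hsio]; exact addrPrefix_drop seq 0 k (le_of_lt hk)
    rw [hres]
    simp only [hsik, if_neg hkne]
    rcases findStop_spec (seq.getD k "") (seq.drop (k + 1)) stop ((0 : Int) + (k : Nat))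
        ((addrPrefix seq 0).getD k 0 - PySem.Str.len (seq.getD k ""))
        (PySem.Str.len ((seq.drop k).headD "")) with
      ⟨m, hm, hres2, hFG2⟩ | ⟨hall2, hres2⟩
    · -- second loop breaks at local index m; global stop index is k + m
      rw [← hdrop] at hres2 hFG2 hm
      rw [hlocal] at hres2 hFG2
      have hmlen : m < seq.length - k := by simpa using hm
      have hFG2' : FirstGE (addrPrefix seq 0) stop (k + m) := by
        refine ⟨by omega, ?_, ?_⟩
        · intro i hi
          by_cases hik : i < k
          · exact lt_of_lt_of_le (hFG.2.1 i hik) hss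
          · have h5 := hFG2.2.1 (i - k) (by omega)
            rw [getD_drop] at h5
            have : k + (i - k) = i := by omega
            rwa [this] at h5
        · intro hi
          have h6 := hFG2.2.2 (by simp only [List.length_drop]; omega)
          rwa [getD_drop] at h6
      have hti : addrBisect (addrPrefix seq 0) stop 0 seq.length = k + m :=
        firstGE_unique _ _ _ _ hbs2 hFG2'
      have htine : ¬ (k + m = seq.length) := by omega
      rw [hres2]
      simp only [hti, if_neg htine, getD_drop]
      have htio : (addrPrefix seq 0).getD (k + m) 0 -
          PySem.Str.len (seq.getD (k + m) "") =
          (if k + m > 0 then (addrPrefix seq 0).getD (k + m - 1) 0 else 0) :=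
        addrPrefix_sub_len seq 0 (k + m) (by omega)
      rw [hsio, htio]
      simp only [Prod.mk.injEq]
      refine ⟨⟨by push_cast; ring, trivial⟩, ⟨by push_cast; ring, trivial⟩⟩
    · -- second loop falls through: stop exceeds total length; clamp to last segment
      rw [← hdrop] at hres2 hall2
      rw [hlocal] at hres2 hall2
      have hsl1 : 1 ≤ seq.length := by omega
      have htiall : addrBisect (addrPrefix seq 0) stop 0 seq.length = seq.length := by
        set ti := addrBisect (addrPrefix seq 0) stop 0 seq.length with htidef
        by_contra hne
        have h1 : ti < (addrPrefix seq 0).length := by have := hbs2.1; omega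
        have h2 := hbs2.2.2 h1
        by_cases hik : ti < k
        · have := hFG.2.1 ti hik
          omega
        · have h5 := hall2 (ti - k) (by simp only [List.length_drop]; omega)
          rw [getD_drop] at h5
          have heq : k + (ti - k) = ti := by omega
          rw [heq] at h5
          omega
      rw [hres2]
      simp only [htiall, reduceIte]
      have hlast : (seq.drop k).length - 1 = seq.length - k - 1 := by
        simp only [List.length_drop]
      rw [hlast, getD_drop, getD_drop]
      have hidx : k + (seq.length - k - 1) = seq.length - 1 := by omega
      rw [hidx]
      have htio : (addrPrefix seq 0).getD (seq.length - 1) 0 -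
          PySem.Str.len (seq.getD (seq.length - 1) "") =
          (if seq.length - 1 > 0 then (addrPrefix seq 0).getD (seq.length - 1 - 1) 0 else 0) :=
        addrPrefix_sub_len seq 0 (seq.length - 1) (by omega)
      rw [hsio, htio]
      simp only [Prod.mk.injEq, List.length_drop]
      refine ⟨⟨by push_cast; ring, trivial⟩, ⟨by push_cast; omega, trivial⟩⟩
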